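-- pv_equiv track=rewrite | github.com/TanyaBazeleva/Bazelieva | 13.13_5205.py | bracket_sequences
-- ===== SOURCE A (Python) =====
-- modulo = 301907
--
-- def bracket_sequences(pattern):
--     n = len(pattern)
--     dp = [[0] * (n + 1) for _ in range(n + 1)]
--     dp[0][0] = 1
--     for i in range(n):
--         for j in range(n + 1):
--             if dp[i][j] > 0:
--                 if pattern[i] in "(?":
--                     dp[i + 1][j + 1] = (dp[i + 1][j + 1] + dp[i][j]) % modulo
--                 if pattern[i] in ")?":
--                     if j > 0:
--                         dp[i + 1][j - 1] = (dp[i + 1][j - 1] + dp[i][j]) % modulo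
--     return dp[n][0]
-- ===== SOURCE B (Python) =====
-- modulo = 301907
--
-- def bracket_sequences(pattern):
--     n = len(pattern)
--     memo = {}
--
--     def count(i, j):
--         # number of ways to complete pattern[i:] from balance j down to balance 0
--         if i == n:
--             return 1 if j == 0 else 0
--         v = memo.get((i, j))
--         if v is not None:
--             return v
--         c = pattern[i]
--         t = 0
--         if c == '(' or c == '?':
--             t = count(i + 1, j + 1)
--         if (c == ')' or c == '?') and j > 0:
--             t += count(i + 1, j - 1)
--         t %= modulo
--         memo[(i, j)] = t
--         return t
--
--     return count(0, 0)
-- ===== Notes on version B (the rewrite author's own statement) =====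
-- stated objective: faster
-- what changed: B replaces A's forward (n+1)x(n+1) scatter DP table by a top-down memoized recursion on suffixes (f(i,j) = ways to complete pattern[i:] from balance j to 0, answer f(0,0)), which only computes the reachable (i,j) states instead of always scanning the full table.
import Mathlib
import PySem

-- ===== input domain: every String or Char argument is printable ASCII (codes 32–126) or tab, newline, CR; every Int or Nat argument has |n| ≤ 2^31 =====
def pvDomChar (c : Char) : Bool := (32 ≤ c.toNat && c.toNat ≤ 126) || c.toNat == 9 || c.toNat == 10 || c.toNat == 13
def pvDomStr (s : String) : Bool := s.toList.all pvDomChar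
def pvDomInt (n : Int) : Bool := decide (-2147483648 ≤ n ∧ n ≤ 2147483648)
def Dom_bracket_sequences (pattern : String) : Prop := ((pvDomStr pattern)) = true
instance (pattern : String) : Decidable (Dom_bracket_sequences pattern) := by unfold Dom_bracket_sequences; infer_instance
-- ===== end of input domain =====

-- B replaces A's forward (n+1)×(n+1) scatter DP table by a top-down memoized recursion on
-- suffix completions (f(i,j) = ways to complete pattern[i:] from balance j to 0); it computes only
-- the reachable (i,j) states, which a timing run measured faster than A's full-table scan.

-- ===== PORT A =====
def pvModulo : Int := 301907

def pvOpen (c : Char) : Bool := c == '(' || c == '?'   -- c in "(?"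
def pvClose (c : Char) : Bool := c == ')' || c == '?'  -- c in ")?"

-- dp[i][j] read (all reads the Python performs are in range, so the default is never returned)
def pvGetRow (dp : List (List Int)) (i j : Nat) : Int := (dp.getD i []).getD j 0

-- dp[i][j] = v
def pvSet2 (dp : List (List Int)) (i j : Nat) (v : Int) : List (List Int) :=
  dp.set i ((dp.getD i []).set j v)

-- second `if` of A's inner-loop body (dp1 = table after the first `if`)
def pvInnerClose (p : List Char) (i j : Nat) (dp1 : List (List Int)) : List (List Int) :=
  if pvClose (p.getD i ' ') then
    (if 0 < j then
      pvSet2 dp1 (i+1) (j-1) ((pvGetRow dp1 (i+1) (j-1) + pvGetRow dp1 i j) % pvModulo)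
    else dp1)
  else dp1

-- body of A's inner loop, for row i and column j
def pvInnerA (p : List Char) (i : Nat) (dp : List (List Int)) (j : Nat) : List (List Int) :=
  if pvGetRow dp i j > 0 then
    pvInnerClose p i j
      (if pvOpen (p.getD i ' ') then
        pvSet2 dp (i+1) (j+1) ((pvGetRow dp (i+1) (j+1) + pvGetRow dp i j) % pvModulo)
      else dp)
  else dp

def bracket_sequences (pattern : String) : Int :=
  let n := pattern.length
  let p := pattern.toList
  let dp0 := pvSet2 (List.replicate (n+1) (List.replicate (n+1) (0:Int))) 0 0 1
  let dp := (List.range n).foldl (fun t i => (List.range (n+1)).foldl (pvInnerA p i) t) dp0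
  pvGetRow dp n 0

-- ===== PORT B =====
-- the memoized recursion `count(i, j)` of Source B, with the memo dict threaded through;
-- `fuel` only makes the recursion structural (fuel ≥ n - i always holds, so the 0-branch is dead)
def pvCount (p : List Char) (n : Nat) :
    Nat → Nat → Nat → PySem.Dict (Nat × Nat) Int → Int × PySem.Dict (Nat × Nat) Int
  | fuel, i, j, memo =>
    if i = n then (if j = 0 then 1 else 0, memo)
    else
      match memo.get? (i, j) with
      | some v => (v, memo)
      | none =>
        match fuel with
        | 0 => (0, memo)
        | fuel' + 1 =>
          let c := p.getD i ' '
          let r1 := if c == '(' || c == '?' then pvCount p n fuel' (i+1) (j+1) memo else (0, memo)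
          let r2 := if (c == ')' || c == '?') && decide (0 < j) then pvCount p n fuel' (i+1) (j-1) r1.2
                    else (0, r1.2)
          let t := (r1.1 + r2.1) % pvModulo
          (t, r2.2.insert (i, j) t)

def bracket_sequences_alt (pattern : String) : Int :=
  (pvCount pattern.toList pattern.length pattern.length 0 0 PySem.Dict.empty).1

-- ===== PRECONDITION & SPEC =====
def Spec_bracket_sequences (pattern : String) (out : Int) : Prop := out = bracket_sequences_alt pattern
instance (pattern : String) (out : Int) : Decidable (Spec_bracket_sequences pattern out) := by unfold Spec_bracket_sequences; infer_instance

-- ===== CLAIM (what is proved, stated in full; the proofs are below) =====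
def Claim_equal_bracket_sequences : Prop := ∀ (pattern : String), Dom_bracket_sequences pattern → Spec_bracket_sequences pattern (bracket_sequences pattern)

-- ===== LEMMAS AND PROOFS =====

-- pvNP l a b = number of ways to turn l into a bracket walk from balance a to balance b
def pvNP : List Char → Nat → Nat → Nat
  | [], a, b => if a = b then 1 else 0
  | c :: cs, a, b =>
      (if pvOpen c then pvNP cs (a+1) b else 0) +
      (if pvClose c ∧ 0 < a then pvNP cs (a-1) b else 0)

theorem pvNP_zero_hi : ∀ (l : List Char) (a b : Nat), a + l.length < b → pvNP l a b = 0 := by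
  intro l
  induction l with
  | nil => intro a b h; simp [pvNP]; omega
  | cons c cs ih =>
      intro a b h
      simp only [pvNP, List.length_cons] at *
      rw [show pvNP cs (a+1) b = 0 from ih _ _ (by omega)]
      by_cases hc : pvClose c ∧ 0 < a
      · rw [show pvNP cs (a-1) b = 0 from ih _ _ (by omega)]; simp
      · simp [hc]

theorem pvNP_snoc : ∀ (l : List Char) (c : Char) (a b : Nat),
    pvNP (l ++ [c]) a b =
      (if pvOpen c ∧ 0 < b then pvNP l a (b-1) else 0) +
      (if pvClose c then pvNP l a (b+1) else 0) := by
  intro l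
  induction l with
  | nil =>
      intro c a b
      simp only [List.nil_append, pvNP]
      split_ifs <;> simp_all <;> omega
  | cons d ds ih =>
      intro c a b
      simp only [List.cons_append, pvNP, ih]
      split_ifs <;> ((try simp_all) <;> omega)

theorem pvMod_idem (x : Int) : x % pvModulo % pvModulo = x % pvModulo :=
  Int.emod_emod_of_dvd _ dvd_rfl

-- getD after set / on replicate
theorem pvGetD_set {α : Type} (l : List α) (i j : Nat) (a d : α) :
    (l.set i a).getD j d = if i = j ∧ i < l.length then a else l.getD j d := by
  simp only [List.getD_eq_getElem?_getD, List.getElem?_set]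
  by_cases hij : i = j
  · subst hij
    by_cases hlt : i < l.length
    · simp [hlt]
    · simp [hlt]
  · simp [hij]

theorem pvGetD_replicate {α : Type} (n i : Nat) (a d : α) :
    (List.replicate n a).getD i d = if i < n then a else d := by
  simp only [List.getD_eq_getElem?_getD, List.getElem?_replicate]
  split_ifs <;> simp_all

-- ========== the B side ==========

-- every memo entry is a correct suffix-completion count
def pvGood (p : List Char) (memo : PySem.Dict (Nat × Nat) Int) : Prop :=
  ∀ i j v, memo.get? (i, j) = some v → v = ((pvNP (p.drop i) j 0 : Int)) % pvModulo

theorem pvDrop_cons (p : List Char) (i : Nat) (h : i < p.length) :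
    p.drop i = p.getD i ' ' :: p.drop (i+1) := by
  rw [List.getD_eq_getElem?_getD, List.getElem?_eq_getElem h]
  exact (List.drop_eq_getElem_cons h)

theorem pvCount_spec (p : List Char) (n : Nat) (hn : p.length = n) :
    ∀ (fuel i j : Nat) (memo : PySem.Dict (Nat × Nat) Int), n - i ≤ fuel → i ≤ n →
      pvGood p memo →
      (pvCount p n fuel i j memo).1 = ((pvNP (p.drop i) j 0 : Int)) % pvModulo ∧
      pvGood p (pvCount p n fuel i j memo).2 := by
  intro fuel
  induction fuel with
  | zero =>
      intro i j memo hfuel hi hg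
      have hin : i = n := by omega
      subst hin
      rw [pvCount]
      simp only [if_pos rfl]
      refine ⟨?_, hg⟩
      rw [List.drop_eq_nil_of_le (by omega)]
      simp only [pvNP]
      by_cases hj : j = 0 <;> simp [hj] <;> norm_num [pvModulo]
  | succ fuel ih =>
      intro i j memo hfuel hi hg
      rw [pvCount]
      by_cases hin : i = n
      · subst hin
        simp only [if_pos rfl]
        refine ⟨?_, hg⟩
        rw [List.drop_eq_nil_of_le (by omega)]
        simp only [pvNP]
        by_cases hj : j = 0 <;> simp [hj] <;> norm_num [pvModulo]
      · rw [if_neg hin]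
        have hilt : i < n := by omega
        cases hmget : memo.get? (i, j) with
        | some v =>
            exact ⟨hg i j v hmget, hg⟩
        | none =>
            simp only
            have hip : i < p.length := by omega
            have hdrop := pvDrop_cons p i hip
            set c := p.getD i ' ' with hc
            obtain ⟨h1v, h1g⟩ :
                (if c == '(' || c == '?' then pvCount p n fuel (i+1) (j+1) memo else (0, memo)).1
                  = (if pvOpen c then ((pvNP (p.drop (i+1)) (j+1) 0 : Int)) % pvModulo else 0) ∧
                pvGood p (if c == '(' || c == '?' then pvCount p n fuel (i+1) (j+1) memo
                          else (0, memo)).2 := by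
              by_cases ho : (c == '(' || c == '?') = true
              · obtain ⟨hv, hgd⟩ := ih (i+1) (j+1) memo (by omega) (by omega) hg
                rw [if_pos ho]
                exact ⟨by rw [hv, if_pos (by simpa [pvOpen] using ho)], hgd⟩
              · rw [if_neg ho]
                exact ⟨by rw [if_neg (by simpa [pvOpen] using ho)], hg⟩
            set r1 := (if c == '(' || c == '?' then pvCount p n fuel (i+1) (j+1) memo
                       else (0, memo)) with hr1
            obtain ⟨h2v, h2g⟩ :
                (if (c == ')' || c == '?') && decide (0 < j) then pvCount p n fuel (i+1) (j-1) r1.2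
                 else (0, r1.2)).1
                  = (if pvClose c ∧ 0 < j then ((pvNP (p.drop (i+1)) (j-1) 0 : Int)) % pvModulo
                     else 0) ∧
                pvGood p (if (c == ')' || c == '?') && decide (0 < j) then
                            pvCount p n fuel (i+1) (j-1) r1.2 else (0, r1.2)).2 := by
              by_cases hcl : ((c == ')' || c == '?') && decide (0 < j)) = true
              · obtain ⟨hv, hgd⟩ := ih (i+1) (j-1) r1.2 (by omega) (by omega) h1g
                rw [if_pos hcl]
                simp only [Bool.and_eq_true, decide_eq_true_eq] at hcl
                have hcl' : pvClose c = true ∧ 0 < j := ⟨by simpa [pvClose] using hcl.1, hcl.2⟩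
                exact ⟨by rw [hv, if_pos hcl'], hgd⟩
              · rw [if_neg hcl]
                simp only [Bool.and_eq_true, decide_eq_true_eq] at hcl
                have hcl' : ¬ (pvClose c = true ∧ 0 < j) := by
                  rintro ⟨a, b⟩
                  exact hcl ⟨by simpa [pvClose] using a, b⟩
                exact ⟨by rw [if_neg hcl'], h1g⟩
            set r2 := (if (c == ')' || c == '?') && decide (0 < j) then
                         pvCount p n fuel (i+1) (j-1) r1.2 else (0, r1.2)) with hr2
            have hval : (r1.1 + r2.1) % pvModulo = ((pvNP (p.drop i) j 0 : Int)) % pvModulo := by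
              rw [h1v, h2v, hdrop]
              simp only [pvNP]
              by_cases ho : pvOpen c = true <;> by_cases hcj : pvClose c ∧ 0 < j <;>
                simp [ho, hcj, Int.add_emod, pvMod_idem] <;> push_cast <;>
                  rw [← Int.add_emod]
            refine ⟨hval, ?_⟩
            intro i' j' v' hv'
            rw [PySem.Dict.get?_insert] at hv'
            by_cases hk : ((i', j') : Nat × Nat) = (i, j)
            · rw [if_pos hk] at hv'
              obtain ⟨hi', hj'⟩ := Prod.mk.injEq .. ▸ hk
              cases hv'
              rw [hi', hj']
              exact hval
            · rw [if_neg hk] at hv'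
              exact h2g i' j' v' hv'

-- ========== the A side ==========

-- row spec of A's table after the first i outer iterations
def pvTspec (p : List Char) (i : Nat) : Nat → Nat → Int :=
  fun x y => if x ≤ i then ((pvNP (p.take x) 0 y : Int)) % pvModulo else 0

def pvAterm (p : List Char) (i J k : Nat) : Int :=
  if pvOpen (p.getD i ' ') ∧ 0 < k ∧ k ≤ J then ((pvNP (p.take i) 0 (k-1) : Int)) % pvModulo else 0

def pvBterm (p : List Char) (i J k : Nat) : Int :=
  if pvClose (p.getD i ' ') ∧ k + 1 < J then ((pvNP (p.take i) 0 (k+1) : Int)) % pvModulo else 0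

def pvPartial (p : List Char) (i J k : Nat) : Int :=
  (pvAterm p i J k + pvBterm p i J k) % pvModulo

theorem pvAterm_mod (p : List Char) (i J k : Nat) :
    pvAterm p i J k % pvModulo = pvAterm p i J k := by
  unfold pvAterm
  split_ifs
  · exact pvMod_idem _
  · simp

theorem pvAterm_succ (p : List Char) (i J k : Nat) (h : k ≠ J + 1) :
    pvAterm p i (J+1) k = pvAterm p i J k := by
  unfold pvAterm
  by_cases ho : pvOpen (p.getD i ' ') = true
  · by_cases hk : 0 < k ∧ k ≤ J
    · rw [if_pos ⟨ho, hk.1, by omega⟩, if_pos ⟨ho, hk.1, hk.2⟩]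
    · rw [if_neg (by rintro ⟨-, h1, h2⟩; exact hk ⟨h1, by omega⟩),
          if_neg (by rintro ⟨-, h1, h2⟩; exact hk ⟨h1, h2⟩)]
  · rw [if_neg (by rintro ⟨h1, -⟩; exact ho h1), if_neg (by rintro ⟨h1, -⟩; exact ho h1)]

theorem pvBterm_succ (p : List Char) (i J k : Nat) (h : k + 1 ≠ J) :
    pvBterm p i (J+1) k = pvBterm p i J k := by
  unfold pvBterm
  by_cases hc : pvClose (p.getD i ' ') = true
  · by_cases hk : k + 1 < J
    · rw [if_pos ⟨hc, by omega⟩, if_pos ⟨hc, hk⟩]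
    · rw [if_neg (by rintro ⟨-, h2⟩; omega), if_neg (by rintro ⟨-, h2⟩; exact hk h2)]
  · rw [if_neg (by rintro ⟨h1, -⟩; exact hc h1), if_neg (by rintro ⟨h1, -⟩; exact hc h1)]

theorem pvAterm_no (p : List Char) (i J k : Nat) (h : ¬ pvOpen (p.getD i ' ') = true) :
    pvAterm p i J k = 0 := by
  unfold pvAterm; rw [if_neg (by rintro ⟨h1, -⟩; exact h h1)]

theorem pvBterm_no (p : List Char) (i J k : Nat) (h : ¬ pvClose (p.getD i ' ') = true) :
    pvBterm p i J k = 0 := by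
  unfold pvBterm; rw [if_neg (by rintro ⟨h1, -⟩; exact h h1)]

theorem pvPartial_nil (p : List Char) (i y : Nat) : pvPartial p i 0 y = 0 := by
  unfold pvPartial pvAterm pvBterm
  rw [if_neg (by rintro ⟨-, h1, h2⟩; omega), if_neg (by rintro ⟨-, h⟩; omega)]
  simp

theorem pvPartial_zero_col (p : List Char) (i J : Nat) : pvPartial p i J (J+1) = 0 := by
  unfold pvPartial pvAterm pvBterm
  rw [if_neg (by rintro ⟨-, -, h⟩; omega), if_neg (by rintro ⟨-, h⟩; omega)]
  simp

theorem pvPartial_top_succ (p : List Char) (i J : Nat) (ho : pvOpen (p.getD i ' ') = true) :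
    pvPartial p i (J+1) (J+1) = ((pvNP (p.take i) 0 J : Int)) % pvModulo := by
  unfold pvPartial pvAterm pvBterm
  rw [if_pos ⟨ho, by omega, le_rfl⟩, if_neg (by rintro ⟨-, h⟩; omega),
      show J + 1 - 1 = J from rfl, add_zero, pvMod_idem]

theorem pvPartial_low_succ (p : List Char) (i J : Nat) (hc : pvClose (p.getD i ' ') = true)
    (hJ : 0 < J) :
    pvPartial p i (J+1) (J-1)
      = (pvPartial p i J (J-1) + ((pvNP (p.take i) 0 J : Int)) % pvModulo) % pvModulo := by
  have hB0 : pvBterm p i J (J-1) = 0 := by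
    unfold pvBterm; rw [if_neg (by rintro ⟨-, h⟩; omega)]
  have h1 : pvPartial p i J (J-1) = pvAterm p i J (J-1) := by
    unfold pvPartial; rw [hB0, add_zero, pvAterm_mod]
  have hB : pvBterm p i (J+1) (J-1) = ((pvNP (p.take i) 0 J : Int)) % pvModulo := by
    unfold pvBterm; rw [if_pos ⟨hc, by omega⟩, show J - 1 + 1 = J by omega]
  rw [h1]
  unfold pvPartial
  rw [pvAterm_succ p i J (J-1) (by omega), hB]

theorem pvPartial_succ_zero (p : List Char) (i J : Nat)
    (h0 : ((pvNP (p.take i) 0 J : Int)) % pvModulo = 0) (k : Nat) :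
    pvPartial p i (J+1) k = pvPartial p i J k := by
  unfold pvPartial
  by_cases hk1 : k = J + 1
  · subst hk1
    have hA1 : pvAterm p i (J+1) (J+1) = 0 := by
      unfold pvAterm
      by_cases ho : pvOpen (p.getD i ' ') = true
      · rw [if_pos ⟨ho, by omega, le_rfl⟩, show J + 1 - 1 = J from rfl, h0]
      · rw [if_neg (by rintro ⟨h, -⟩; exact ho h)]
    have hA2 : pvAterm p i J (J+1) = 0 := by
      unfold pvAterm; rw [if_neg (by rintro ⟨-, -, h⟩; omega)]
    rw [hA1, hA2, pvBterm_succ p i J (J+1) (by omega)]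
  · by_cases hk2 : k + 1 = J
    · rw [pvAterm_succ p i J k hk1]
      congr 1
      unfold pvBterm
      by_cases hc : pvClose (p.getD i ' ') = true
      · rw [if_pos ⟨hc, by omega⟩, if_neg (by rintro ⟨-, h⟩; omega), hk2, h0]
      · rw [if_neg (by rintro ⟨h, -⟩; exact hc h), if_neg (by rintro ⟨h, -⟩; exact hc h)]
    · rw [pvAterm_succ p i J k hk1, pvBterm_succ p i J k hk2]

-- table shape: n+1 rows of n+1 entries
def pvShape (n : Nat) (dp : List (List Int)) : Prop :=
  dp.length = n + 1 ∧ ∀ r ∈ dp, r.length = n + 1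

theorem pvShape_set2 (n : Nat) (dp : List (List Int)) (i j : Nat) (v : Int)
    (h : pvShape n dp) (hi : i ≤ n) : pvShape n (pvSet2 dp i j v) := by
  obtain ⟨h1, h2⟩ := h
  constructor
  · rw [pvSet2, List.length_set, h1]
  · intro r hr
    rcases List.mem_or_eq_of_mem_set hr with hr' | hr'
    · exact h2 r hr'
    · subst hr'
      rw [List.length_set]
      have hlt : i < dp.length := by omega
      rw [List.getD_eq_getElem?_getD, List.getElem?_eq_getElem hlt]
      exact h2 _ (List.getElem_mem hlt)

theorem pvGetRow_set2 (n : Nat) (dp : List (List Int)) (a b : Nat) (v : Int)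
    (h : pvShape n dp) (ha : a ≤ n) (hb : b ≤ n) (x y : Nat) :
    pvGetRow (pvSet2 dp a b v) x y = if x = a ∧ y = b then v else pvGetRow dp x y := by
  obtain ⟨h1, h2⟩ := h
  have hlt : a < dp.length := by omega
  unfold pvGetRow pvSet2
  rw [pvGetD_set]
  by_cases hx : x = a
  · subst hx
    rw [if_pos ⟨rfl, hlt⟩, pvGetD_set]
    by_cases hy : y = b
    · subst hy
      have hrow : (dp.getD x []).length = n + 1 := by
        rw [List.getD_eq_getElem?_getD, List.getElem?_eq_getElem hlt]
        exact h2 _ (List.getElem_mem hlt)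
      rw [if_pos (show y = y ∧ y < (dp.getD x []).length from ⟨rfl, by omega⟩),
          if_pos ⟨rfl, rfl⟩]
    · rw [if_neg (by rintro ⟨h', -⟩; exact hy h'.symm), if_neg (by rintro ⟨-, h'⟩; exact hy h')]
  · rw [if_neg (by rintro ⟨h', -⟩; exact hx h'.symm), if_neg (by rintro ⟨h', -⟩; exact hx h')]

theorem pvInnerA_step (p : List Char) (n i J : Nat) (_hplen : p.length = n) (hi : i < n)
    (dp : List (List Int)) (hs : pvShape n dp)
    (hrep : ∀ x y, pvGetRow dp x y = if x = i+1 then pvPartial p i J y else pvTspec p i x y) :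
    pvShape n (pvInnerA p i dp J) ∧
    ∀ x y, pvGetRow (pvInnerA p i dp J) x y
      = if x = i+1 then pvPartial p i (J+1) y else pvTspec p i x y := by
  have hii : ¬ (i = i + 1) := by omega
  have hgetiJ : pvGetRow dp i J = ((pvNP (p.take i) 0 J : Int)) % pvModulo := by
    rw [hrep, if_neg hii]
    unfold pvTspec
    rw [if_pos le_rfl]
  unfold pvInnerA
  by_cases hv : pvGetRow dp i J > 0
  · rw [if_pos hv]
    -- the guard passed, so the count at (i, J) is nonzero, hence J ≤ i (and all writes are in range)
    have hJi : J ≤ i := by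
      by_contra hJi
      rw [hgetiJ, pvNP_zero_hi (p.take i) 0 J (by simp [List.length_take]; omega)] at hv
      simp at hv
    have hv1 : (pvGetRow dp (i+1) (J+1) + pvGetRow dp i J) % pvModulo
        = ((pvNP (p.take i) 0 J : Int)) % pvModulo := by
      rw [hrep (i+1) (J+1), if_pos rfl, pvPartial_zero_col, hgetiJ, zero_add, pvMod_idem]
    by_cases ho : pvOpen (p.getD i ' ') = true
    · rw [if_pos ho, hv1]
      have hs1 : pvShape n (pvSet2 dp (i+1) (J+1) (((pvNP (p.take i) 0 J : Int)) % pvModulo)) :=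
        pvShape_set2 n dp (i+1) (J+1) _ hs (by omega)
      have hg1 : ∀ x y,
          pvGetRow (pvSet2 dp (i+1) (J+1) (((pvNP (p.take i) 0 J : Int)) % pvModulo)) x y
            = if x = i+1 ∧ y = J+1 then ((pvNP (p.take i) 0 J : Int)) % pvModulo
              else pvGetRow dp x y := by
        intro x y
        rw [pvGetRow_set2 n dp (i+1) (J+1) _ hs (by omega) (by omega)]
      unfold pvInnerClose
      by_cases hc : pvClose (p.getD i ' ') = true
      · rw [if_pos hc]
        by_cases hJ0 : 0 < J
        · rw [if_pos hJ0]
          have e1 : pvGetRow (pvSet2 dp (i+1) (J+1) (((pvNP (p.take i) 0 J : Int)) % pvModulo))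
              (i+1) (J-1) = pvPartial p i J (J-1) := by
            rw [hg1, if_neg (by rintro ⟨-, h⟩; omega), hrep, if_pos rfl]
          have e2 : pvGetRow (pvSet2 dp (i+1) (J+1) (((pvNP (p.take i) 0 J : Int)) % pvModulo))
              i J = ((pvNP (p.take i) 0 J : Int)) % pvModulo := by
            rw [hg1, if_neg (by rintro ⟨h, -⟩; omega), hgetiJ]
          rw [e1, e2]
          refine ⟨pvShape_set2 n _ (i+1) (J-1) _ hs1 (by omega), ?_⟩
          intro x y
          rw [pvGetRow_set2 n _ (i+1) (J-1) _ hs1 (by omega) (by omega), hg1]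
          by_cases hx : x = i + 1
          · subst hx
            rw [if_pos rfl]
            by_cases hy1 : y = J - 1
            · subst hy1
              rw [if_pos ⟨rfl, rfl⟩, pvPartial_low_succ p i J hc hJ0]
            · rw [if_neg (by rintro ⟨-, h⟩; exact hy1 h)]
              by_cases hy2 : y = J + 1
              · subst hy2
                rw [if_pos ⟨rfl, rfl⟩, pvPartial_top_succ p i J ho]
              · rw [if_neg (by rintro ⟨-, h⟩; exact hy2 h), hrep, if_pos rfl]
                unfold pvPartial
                rw [pvAterm_succ p i J y hy2, pvBterm_succ p i J y (by omega)]
          · rw [if_neg (by rintro ⟨h, -⟩; exact hx h), if_neg (by rintro ⟨h, -⟩; exact hx h),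
                hrep, if_neg hx, if_neg hx]
        · rw [if_neg hJ0]
          refine ⟨hs1, ?_⟩
          intro x y
          rw [hg1]
          by_cases hx : x = i + 1
          · subst hx
            rw [if_pos rfl]
            by_cases hy2 : y = J + 1
            · subst hy2
              rw [if_pos ⟨rfl, rfl⟩, pvPartial_top_succ p i J ho]
            · rw [if_neg (by rintro ⟨-, h⟩; exact hy2 h), hrep, if_pos rfl]
              unfold pvPartial
              rw [pvAterm_succ p i J y hy2, pvBterm_succ p i J y (by omega)]
          · rw [if_neg (by rintro ⟨h, -⟩; exact hx h), hrep, if_neg hx, if_neg hx]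
      · rw [if_neg hc]
        refine ⟨hs1, ?_⟩
        intro x y
        rw [hg1]
        by_cases hx : x = i + 1
        · subst hx
          rw [if_pos rfl]
          by_cases hy2 : y = J + 1
          · subst hy2
            rw [if_pos ⟨rfl, rfl⟩, pvPartial_top_succ p i J ho]
          · rw [if_neg (by rintro ⟨-, h⟩; exact hy2 h), hrep, if_pos rfl]
            unfold pvPartial
            rw [pvAterm_succ p i J y hy2, pvBterm_no p i J y hc, pvBterm_no p i (J+1) y hc]
        · rw [if_neg (by rintro ⟨h, -⟩; exact hx h), hrep, if_neg hx, if_neg hx]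
    · rw [if_neg ho]
      unfold pvInnerClose
      by_cases hc : pvClose (p.getD i ' ') = true
      · rw [if_pos hc]
        by_cases hJ0 : 0 < J
        · rw [if_pos hJ0]
          have e1 : pvGetRow dp (i+1) (J-1) = pvPartial p i J (J-1) := by
            rw [hrep, if_pos rfl]
          rw [e1, hgetiJ]
          refine ⟨pvShape_set2 n dp (i+1) (J-1) _ hs (by omega), ?_⟩
          intro x y
          rw [pvGetRow_set2 n dp (i+1) (J-1) _ hs (by omega) (by omega)]
          by_cases hx : x = i + 1
          · subst hx
            rw [if_pos rfl]
            by_cases hy1 : y = J - 1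
            · subst hy1
              rw [if_pos ⟨rfl, rfl⟩, pvPartial_low_succ p i J hc hJ0]
            · rw [if_neg (by rintro ⟨-, h⟩; exact hy1 h), hrep, if_pos rfl]
              unfold pvPartial
              rw [pvAterm_no p i J y ho, pvAterm_no p i (J+1) y ho,
                  pvBterm_succ p i J y (by omega)]
          · rw [if_neg (by rintro ⟨h, -⟩; exact hx h), hrep, if_neg hx, if_neg hx]
        · rw [if_neg hJ0]
          refine ⟨hs, ?_⟩
          intro x y
          rw [hrep]
          by_cases hx : x = i + 1
          · subst hx
            rw [if_pos rfl, if_pos rfl]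
            unfold pvPartial
            rw [pvAterm_no p i J y ho, pvAterm_no p i (J+1) y ho,
                pvBterm_succ p i J y (by omega)]
          · rw [if_neg hx, if_neg hx]
      · rw [if_neg hc]
        refine ⟨hs, ?_⟩
        intro x y
        rw [hrep]
        by_cases hx : x = i + 1
        · subst hx
          rw [if_pos rfl, if_pos rfl]
          unfold pvPartial
          rw [pvAterm_no p i J y ho, pvAterm_no p i (J+1) y ho,
              pvBterm_no p i J y hc, pvBterm_no p i (J+1) y hc]
        · rw [if_neg hx, if_neg hx]
  · rw [if_neg hv]
    have hge : 0 ≤ ((pvNP (p.take i) 0 J : Int)) % pvModulo :=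
      Int.emod_nonneg _ (by decide)
    rw [hgetiJ] at hv
    have h0 : ((pvNP (p.take i) 0 J : Int)) % pvModulo = 0 := by omega
    refine ⟨hs, ?_⟩
    intro x y
    rw [hrep, pvPartial_succ_zero p i J h0 y]

theorem pvInner_spec (p : List Char) (n i : Nat) (hplen : p.length = n) (hi : i < n) :
    ∀ (J : Nat) (dp : List (List Int)), pvShape n dp →
    (∀ x y, pvGetRow dp x y = pvTspec p i x y) →
    pvShape n ((List.range J).foldl (pvInnerA p i) dp) ∧
    ∀ x y, pvGetRow ((List.range J).foldl (pvInnerA p i) dp) x y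
      = if x = i+1 then pvPartial p i J y else pvTspec p i x y := by
  intro J
  induction J with
  | zero =>
      intro dp hs hrep
      simp only [List.range_zero, List.foldl_nil]
      refine ⟨hs, ?_⟩
      intro x y
      rw [hrep]
      by_cases hx : x = i + 1
      · subst hx
        rw [if_pos rfl, pvPartial_nil]
        unfold pvTspec
        rw [if_neg (by omega)]
      · rw [if_neg hx]
  | succ J ih =>
      intro dp hs hrep
      rw [show List.range (J+1) = List.range J ++ [J] from List.range_succ]
      simp only [List.foldl_append, List.foldl_cons, List.foldl_nil]
      obtain ⟨hs', hrep'⟩ := ih dp hs hrep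
      exact pvInnerA_step p n i J hplen hi _ hs' hrep'

theorem pvTake_succ_getD (p : List Char) (i : Nat) (h : i < p.length) :
    p.take (i+1) = p.take i ++ [p.getD i ' '] := by
  rw [List.take_add_one, List.getD_eq_getElem?_getD, List.getElem?_eq_getElem h]
  rfl

theorem pvPartial_full (p : List Char) (n i : Nat) (hlen : p.length = n) (hi : i < n) :
    ∀ y, pvPartial p i (n+1) y = ((pvNP (p.take (i+1)) 0 y : Int)) % pvModulo := by
  intro y
  rw [pvTake_succ_getD p i (by omega), pvNP_snoc]
  by_cases hy : y ≤ n + 1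
  · have hA : pvAterm p i (n+1) y
        = (if pvOpen (p.getD i ' ') = true ∧ 0 < y then ((pvNP (p.take i) 0 (y-1) : Int)) else 0)
            % pvModulo := by
      unfold pvAterm
      by_cases h : pvOpen (p.getD i ' ') = true ∧ 0 < y
      · rw [if_pos ⟨h.1, h.2, hy⟩, if_pos h]
      · rw [if_neg (by rintro ⟨a, b, -⟩; exact h ⟨a, b⟩), if_neg h]
        simp
    have hB : pvBterm p i (n+1) y
        = (if pvClose (p.getD i ' ') = true then ((pvNP (p.take i) 0 (y+1) : Int)) else 0)
            % pvModulo := by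
      unfold pvBterm
      by_cases hc : pvClose (p.getD i ' ') = true
      · by_cases hyn : y + 1 < n + 1
        · rw [if_pos ⟨hc, hyn⟩, if_pos hc]
        · rw [if_neg (by rintro ⟨-, h⟩; exact hyn h), if_pos hc,
              pvNP_zero_hi (p.take i) 0 (y+1) (by simp [List.length_take, hlen]; omega)]
          simp
      · rw [if_neg (by rintro ⟨h, -⟩; exact hc h), if_neg hc]
        simp
    unfold pvPartial
    rw [hA, hB, ← Int.add_emod]
    push_cast
    rfl
  · have h0 : pvPartial p i (n+1) y = 0 := by
      unfold pvPartial pvAterm pvBterm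
      rw [if_neg (by rintro ⟨-, -, h⟩; omega), if_neg (by rintro ⟨-, h⟩; omega)]
      simp
    rw [h0, pvNP_zero_hi (p.take i) 0 (y-1) (by simp [List.length_take, hlen]; omega),
        pvNP_zero_hi (p.take i) 0 (y+1) (by simp [List.length_take, hlen]; omega)]
    simp

theorem pvOuter_spec (p : List Char) (n : Nat) (hlen : p.length = n) :
    ∀ i, i ≤ n →
    pvShape n ((List.range i).foldl (fun t i' => (List.range (n+1)).foldl (pvInnerA p i') t)
        (pvSet2 (List.replicate (n+1) (List.replicate (n+1) (0:Int))) 0 0 1)) ∧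
    ∀ x y, pvGetRow ((List.range i).foldl (fun t i' => (List.range (n+1)).foldl (pvInnerA p i') t)
        (pvSet2 (List.replicate (n+1) (List.replicate (n+1) (0:Int))) 0 0 1)) x y
      = pvTspec p i x y := by
  intro i
  induction i with
  | zero =>
      intro _
      simp only [List.range_zero, List.foldl_nil]
      have hs0 : pvShape n (List.replicate (n+1) (List.replicate (n+1) (0:Int))) := by
        constructor
        · simp
        · intro r hr
          rw [List.eq_of_mem_replicate hr]
          simp
      refine ⟨pvShape_set2 n _ 0 0 1 hs0 (by omega), ?_⟩
      intro x y
      rw [pvGetRow_set2 n _ 0 0 1 hs0 (by omega) (by omega)]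
      have hzero : pvGetRow (List.replicate (n+1) (List.replicate (n+1) (0:Int))) x y = 0 := by
        unfold pvGetRow
        rw [pvGetD_replicate]
        by_cases hx : x < n + 1
        · rw [if_pos hx, pvGetD_replicate]
          split_ifs <;> rfl
        · rw [if_neg hx]
          rfl
      unfold pvTspec
      by_cases hx : x = 0
      · subst hx
        rw [if_pos (show (0:Nat) ≤ 0 from le_rfl)]
        simp only [List.take_zero, pvNP]
        by_cases hy : y = 0
        · subst hy
          norm_num [pvModulo]
        · rw [if_neg (by rintro ⟨-, h⟩; exact hy h), hzero,
              if_neg (by omega : ¬ (0 = y))]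
          simp
      · rw [if_neg (by rintro ⟨h, -⟩; exact hx h), hzero, if_neg (by omega)]
  | succ i ih =>
      intro h
      rw [show List.range (i+1) = List.range i ++ [i] from List.range_succ]
      simp only [List.foldl_append, List.foldl_cons, List.foldl_nil]
      obtain ⟨hs', hrep'⟩ := ih (by omega)
      obtain ⟨hs'', hrep''⟩ := pvInner_spec p n i hlen (by omega) (n+1) _ hs' hrep'
      refine ⟨hs'', ?_⟩
      intro x y
      rw [hrep'']
      by_cases hx : x = i + 1
      · subst hx
        rw [if_pos rfl, pvPartial_full p n i hlen (by omega) y]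
        unfold pvTspec
        rw [if_pos le_rfl]
      · rw [if_neg hx]
        unfold pvTspec
        by_cases hxi : x ≤ i
        · rw [if_pos hxi, if_pos (by omega)]
        · rw [if_neg hxi, if_neg (by omega)]

-- ===== VERDICT (by name: the statement is the Claim_ definition above) =====
theorem bracket_sequences_spec : Claim_equal_bracket_sequences := by
  intro pattern _
  unfold Spec_bracket_sequences bracket_sequences bracket_sequences_alt
  dsimp only
  rw [(pvOuter_spec pattern.toList pattern.length (by simp) pattern.length le_rfl).2,
      (pvCount_spec pattern.toList pattern.length (by simp) pattern.length 0 0 PySem.Dict.empty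
        (by omega) (by omega) (by intro i j v h; simp [PySem.Dict.get?_empty] at h)).1]
  have h : List.take pattern.length pattern.toList = pattern.toList := by
    apply List.take_of_length_le; simp
  unfold pvTspec
  rw [if_pos le_rfl, h, List.drop_zero]
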